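-- pv_equiv track=rewrite | github.com/epilanthanomai/aoc2020 | day08.py | chunk_instructions
-- ===== SOURCE A (Python) =====
-- def chunk_instructions(instructions):
--     chunk_ids, chunks = [], []
--     start = None
--     chunk_id = 0
--     for i, (instruction, argument) in enumerate(instructions):
--         chunk_ids.append(chunk_id)
--         if start is None:
--             start = i
--         if instruction == "jmp":
--             chunks.append((start, i - start + 1, i + argument))
--             start = None
--             chunk_id += 1
--     return chunk_ids, chunks
-- ===== SOURCE B (Python) =====
-- def chunk_instructions(instructions):
--     instructions = list(instructions)
--     jmps = [(i, arg) for i, (ins, arg) in enumerate(instructions) if ins == "jmp"]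
--     chunk_ids, chunks = [], []
--     start = 0
--     for cid, (j, arg) in enumerate(jmps):
--         chunk_ids += [cid] * (j + 1 - start)
--         chunks.append((start, j - start + 1, j + arg))
--         start = j + 1
--     chunk_ids += [len(jmps)] * (len(instructions) - start)
--     return chunk_ids, chunks
-- ===== Notes on version B (the rewrite author's own statement) =====
-- stated objective: alternative
-- what changed: Instead of one per-instruction pass with an Optional start and a running chunk counter, B first extracts the list of jmp positions (with their arguments) and then derives both outputs from that table in a single pass over the jmps: each jmp emits one chunk and a run of repeated chunk ids ([cid]*(j+1-start)), with a final run of len(jmps) covering the trailing jmp-less instructions.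
import Mathlib
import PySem

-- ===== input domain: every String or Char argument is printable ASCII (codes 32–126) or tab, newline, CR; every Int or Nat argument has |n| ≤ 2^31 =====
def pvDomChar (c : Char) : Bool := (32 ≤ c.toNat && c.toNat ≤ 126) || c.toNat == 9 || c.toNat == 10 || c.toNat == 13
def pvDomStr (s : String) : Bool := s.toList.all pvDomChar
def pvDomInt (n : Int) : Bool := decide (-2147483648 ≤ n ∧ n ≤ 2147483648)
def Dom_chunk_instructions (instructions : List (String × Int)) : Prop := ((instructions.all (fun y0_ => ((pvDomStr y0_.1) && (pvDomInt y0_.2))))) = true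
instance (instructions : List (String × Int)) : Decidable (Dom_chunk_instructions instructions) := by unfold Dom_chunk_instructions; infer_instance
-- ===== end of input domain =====

-- B replaces A's per-instruction pass (Optional start, running counter) by a jmp-position
-- table from which both outputs are rebuilt run-by-run: an alternative decomposition, same cost.


-- ===== PORT A =====
def chunk_instructions (instructions : List (String × Int)) : List Int × (List (Int × Int × Int)) :=
  -- state: (chunk_ids, chunks, start : Option Int, chunk_id)
  let st := (PySem.List.enumerate instructions 0).foldl
    (fun (acc : List Int × List (Int × Int × Int) × Option Int × Int) p =>
      let i := p.1
      let instruction := p.2.1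
      let argument := p.2.2
      let chunk_ids := acc.1 ++ [acc.2.2.2]
      let start : Int := match acc.2.2.1 with
        | none => i          -- if start is None: start = i
        | some s => s
      if instruction == "jmp" then
        (chunk_ids, acc.2.1 ++ [(start, i - start + 1, i + argument)], none, acc.2.2.2 + 1)
      else
        (chunk_ids, acc.2.1, some start, acc.2.2.2))
    ([], [], none, 0)
  (st.1, st.2.1)

-- ===== PORT B =====
def chunk_instructions_alt (instructions : List (String × Int)) : List Int × (List (Int × Int × Int)) :=
  -- jmps = [(i, arg) for i, (ins, arg) in enumerate(instructions) if ins == "jmp"]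
  let jmps := (PySem.List.enumerate instructions 0).filterMap
    (fun p => if p.2.1 == "jmp" then some (p.1, p.2.2) else none)
  -- for cid, (j, arg) in enumerate(jmps): ...   state: (chunk_ids, chunks, start)
  let st := (PySem.List.enumerate jmps 0).foldl
    (fun (acc : List Int × List (Int × Int × Int) × Int) q =>
      let cid := q.1
      let j := q.2.1
      let arg := q.2.2
      let start := acc.2.2
      (acc.1 ++ PySem.List.pyRepeat [cid] (j + 1 - start),
       acc.2.1 ++ [(start, j - start + 1, j + arg)],
       j + 1))
    ([], [], 0)
  (st.1 ++ PySem.List.pyRepeat [(jmps.length : Int)] ((instructions.length : Int) - st.2.2), st.2.1)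

-- ===== PRECONDITION & SPEC =====
def Spec_chunk_instructions (instructions : List (String × Int)) (out : List Int × (List (Int × Int × Int))) : Prop := out = chunk_instructions_alt instructions
instance (instructions : List (String × Int)) (out : List Int × (List (Int × Int × Int))) : Decidable (Spec_chunk_instructions instructions out) := by unfold Spec_chunk_instructions; infer_instance

-- ===== CLAIM (what is proved, stated in full; the proofs are below) =====
def Claim_equal_chunk_instructions : Prop := ∀ (instructions : List (String × Int)), Dom_chunk_instructions instructions → Spec_chunk_instructions instructions (chunk_instructions instructions)

-- ===== LEMMAS AND PROOFS =====

-- a common reference: process from index i, current chunk start s, current chunk id cid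
def pvSp : List (String × Int) → Int → Int → Int → List Int × List (Int × Int × Int)
  | [], _, _, _ => ([], [])
  | (ins, arg) :: rest, i, s, cid =>
    if ins == "jmp" then
      let r := pvSp rest (i+1) (i+1) (cid+1)
      (cid :: r.1, (s, i - s + 1, i + arg) :: r.2)
    else
      let r := pvSp rest (i+1) s cid
      (cid :: r.1, r.2)

-- the jmp table, recursively
def pvJmps : List (String × Int) → Int → List (Int × Int)
  | [], _ => []
  | (ins, arg) :: rest, i =>
    (if ins == "jmp" then [(i, arg)] else []) ++ pvJmps rest (i+1)

theorem pvJmps_eq (l : List (String × Int)) (i : Int) :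
    (PySem.List.enumerate l i).filterMap
      (fun p => if p.2.1 == "jmp" then some (p.1, p.2.2) else none) = pvJmps l i := by
  induction l generalizing i with
  | nil => simp [pvJmps, PySem.List.enumerate_nil]
  | cons x rest ih =>
    obtain ⟨ins, arg⟩ := x
    simp only [beq_iff_eq] at ih ⊢
    rw [PySem.List.enumerate_cons, List.filterMap_cons]
    by_cases h : ins = "jmp" <;> simp [pvJmps, h, ih]

theorem pvA_loop (l : List (String × Int)) :
    ∀ (i : Int) (so : Option Int) (ids : List Int) (cks : List (Int × Int × Int)) (cid : Int),
    (((PySem.List.enumerate l i).foldl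
      (fun (acc : List Int × List (Int × Int × Int) × Option Int × Int) p =>
        let i := p.1
        let instruction := p.2.1
        let argument := p.2.2
        let chunk_ids := acc.1 ++ [acc.2.2.2]
        let start : Int := match acc.2.2.1 with
          | none => i
          | some s => s
        if instruction == "jmp" then
          (chunk_ids, acc.2.1 ++ [(start, i - start + 1, i + argument)], none, acc.2.2.2 + 1)
        else
          (chunk_ids, acc.2.1, some start, acc.2.2.2))
      (ids, cks, so, cid)).1,
     ((PySem.List.enumerate l i).foldl
      (fun (acc : List Int × List (Int × Int × Int) × Option Int × Int) p =>
        let i := p.1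
        let instruction := p.2.1
        let argument := p.2.2
        let chunk_ids := acc.1 ++ [acc.2.2.2]
        let start : Int := match acc.2.2.1 with
          | none => i
          | some s => s
        if instruction == "jmp" then
          (chunk_ids, acc.2.1 ++ [(start, i - start + 1, i + argument)], none, acc.2.2.2 + 1)
        else
          (chunk_ids, acc.2.1, some start, acc.2.2.2))
      (ids, cks, so, cid)).2.1)
    = (ids ++ (pvSp l i (so.getD i) cid).1, cks ++ (pvSp l i (so.getD i) cid).2) := by
  induction l with
  | nil => intro i so ids cks cid; simp [pvSp, PySem.List.enumerate_nil]
  | cons x rest ih =>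
    intro i so ids cks cid
    obtain ⟨ins, arg⟩ := x
    rw [PySem.List.enumerate_cons]
    by_cases h : ins == "jmp"
    · cases so <;>
        simp only [List.foldl_cons, h, if_pos, Option.getD, pvSp, ih, Option.getD_none] <;>
        simp [pvSp, h, List.append_assoc]
    · cases so <;>
        simp only [List.foldl_cons, h, pvSp, ih] <;>
        simp [pvSp, h, List.append_assoc]

theorem pvRepeat_succ (c : Int) (n : Int) (h : 0 ≤ n) :
    PySem.List.pyRepeat [c] (n + 1) = PySem.List.pyRepeat [c] n ++ [c] := by
  rw [PySem.List.pyRepeat_singleton, PySem.List.pyRepeat_singleton]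
  have : (n + 1).toNat = n.toNat + 1 := by omega
  rw [this, List.replicate_succ']

theorem pvB_loop (l : List (String × Int)) :
    ∀ (i s cid : Int) (ids : List Int) (cks : List (Int × Int × Int)), s ≤ i →
    (let st := (PySem.List.enumerate (pvJmps l i) cid).foldl
      (fun (acc : List Int × List (Int × Int × Int) × Int) q =>
        let cid := q.1
        let j := q.2.1
        let arg := q.2.2
        let start := acc.2.2
        (acc.1 ++ PySem.List.pyRepeat [cid] (j + 1 - start),
         acc.2.1 ++ [(start, j - start + 1, j + arg)],
         j + 1))
      (ids, cks, s);
     (st.1 ++ PySem.List.pyRepeat [cid + ((pvJmps l i).length : Int)] ((i + (l.length : Int)) - st.2.2), st.2.1))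
    = (ids ++ PySem.List.pyRepeat [cid] (i - s) ++ (pvSp l i s cid).1, cks ++ (pvSp l i s cid).2) := by
  induction l with
  | nil =>
    intro i s cid ids cks hs
    simp [pvJmps, pvSp, PySem.List.enumerate_nil]
  | cons x rest ih =>
    intro i s cid ids cks hs
    obtain ⟨ins, arg⟩ := x
    by_cases h : ins == "jmp"
    · simp only [pvJmps, h, if_pos, List.singleton_append, PySem.List.enumerate_cons,
        List.foldl_cons, pvSp]
      have hlen : cid + (((pvJmps ((ins, arg) :: rest) i).length : Nat) : Int)
          = (cid + 1) + ((pvJmps rest (i+1)).length : Int) := by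
        simp [pvJmps, h]; push_cast; ring
      have hrun : PySem.List.pyRepeat [cid] (i + 1 - s)
          = PySem.List.pyRepeat [cid] (i - s) ++ [cid] := by
        have := pvRepeat_succ cid (i - s) (by omega)
        rw [← this]; ring_nf
      have := ih (i+1) (i+1) (cid+1)
        (ids ++ PySem.List.pyRepeat [cid] (i + 1 - s))
        (cks ++ [(s, i - s + 1, i + arg)]) (le_refl _)
      simp only [pvJmps, h, if_pos, List.singleton_append, List.length_cons] at this ⊢
      have hl : (i + ((rest.length + 1 : Nat) : Int)) = (i + 1) + (rest.length : Int) := by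
        push_cast; ring
      simp only [hl]
      have hl2 : cid + (((pvJmps rest (i+1)).length + 1 : Nat) : Int)
          = (cid + 1) + ((pvJmps rest (i+1)).length : Int) := by push_cast; ring
      simp only [hl2]
      rw [this]
      simp only [pvSp, h, if_pos, List.append_assoc, PySem.List.pyRepeat_singleton]
      rw [show (i + 1 - s).toNat = (i - s).toNat + 1 from by omega, List.replicate_succ']
      simp
    · simp only [pvJmps, h, if_neg, Bool.false_eq_true, not_false_iff, List.nil_append, pvSp]
      have := ih (i+1) s cid ids cks (by omega)
      have hl : (i + (((rest.length : Nat) + 1 : Nat) : Int)) = (i + 1) + (rest.length : Int) := by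
        push_cast; ring
      simp only [List.length_cons, hl]
      rw [this]
      have hrun : PySem.List.pyRepeat [cid] (i + 1 - s)
          = PySem.List.pyRepeat [cid] (i - s) ++ [cid] := by
        have := pvRepeat_succ cid (i - s) (by omega)
        rw [← this]; ring_nf
      simp [pvSp, h, hrun, List.append_assoc]

-- ===== VERDICT (by name: the statement is the Claim_ definition above) =====
theorem chunk_instructions_spec : Claim_equal_chunk_instructions := by
  intro l _
  unfold Spec_chunk_instructions chunk_instructions chunk_instructions_alt
  simp only [pvJmps_eq]
  have hA := pvA_loop l 0 none ([] : List Int) ([] : List (Int × Int × Int)) 0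
  have hB := pvB_loop l 0 0 0 ([] : List Int) ([] : List (Int × Int × Int)) (le_refl 0)
  simp only [] at hB
  rw [show (((pvJmps l 0).length : Nat) : Int) = 0 + (((pvJmps l 0).length : Nat) : Int) from (zero_add _).symm,
     show ((l.length : Nat) : Int) = 0 + ((l.length : Nat) : Int) from (zero_add _).symm]
  rw [Prod.ext_iff] at hA
  refine Prod.ext ?_ ?_
  · rw [hA.1, congrArg Prod.fst hB]
    simp [PySem.List.pyRepeat, Option.getD]
  · rw [hA.2, congrArg Prod.snd hB]
    simp [Option.getD]
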